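-- pv_equiv track=rewrite | github.com/Giangkhamliu/FUNCTION | sum_without_highest_lowest_no.py | sum_array
-- ===== SOURCE A (Python) =====
-- def sum_array(arr):
--     sum=0
--     if arr==None or len(arr)<=2:
--         return 0
--     else:
--         a=min(arr)
--         b=max(arr)
--         i=0
--         while i<len(arr):
--             sum+=arr[i]
--             i+=1
--         c=sum-(a+b)
--         return c
-- ===== SOURCE B (Python) =====
-- def sum_array(arr):
--     if arr is None:
--         return 0
--     s = sorted(arr)
--     return sum(s[1:-1])
-- ===== Notes on version B (the rewrite author's own statement) =====
-- stated objective: simpler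
-- what changed: Replaces the min/max scans plus an explicit index-summing while loop with sorting and summing the interior slice s[1:-1], which drops one min copy and one max copy and yields 0 naturally for lengths 0-2.
import Mathlib
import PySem

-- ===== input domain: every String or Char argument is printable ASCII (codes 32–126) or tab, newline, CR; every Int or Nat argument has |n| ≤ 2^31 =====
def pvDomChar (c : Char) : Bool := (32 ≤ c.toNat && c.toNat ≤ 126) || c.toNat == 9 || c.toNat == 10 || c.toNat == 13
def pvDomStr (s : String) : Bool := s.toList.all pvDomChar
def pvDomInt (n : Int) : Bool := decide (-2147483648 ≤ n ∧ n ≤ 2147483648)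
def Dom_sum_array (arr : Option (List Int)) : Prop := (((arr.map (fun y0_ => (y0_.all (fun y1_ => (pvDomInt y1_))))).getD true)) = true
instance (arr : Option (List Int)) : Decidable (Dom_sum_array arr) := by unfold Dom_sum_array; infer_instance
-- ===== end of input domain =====

-- ===== PORT A =====
-- A: returns 0 for None or short lists; else sums all elements with an index loop and subtracts min+max.
def sum_array (arr : Option (List Int)) : Int :=
  match arr with
  | none => 0
  | some l =>
    if l.length ≤ 2 then 0
    else
      let a := ((PySem.List.min? l (fun x => x)).getD 0)  -- list nonempty here, so min/max exist
      let b := ((PySem.List.max? l (fun x => x)).getD 0)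
      let s := (PySem.List.pyRange 0 (l.length : Int) 1).foldl
        (fun acc i => acc + PySem.List.pyGetD l i 0) 0
      s - (a + b)

-- ===== PORT B =====
-- B: sort, sum the interior slice s[1:-1] (header: simpler; drops one min copy and one max copy).
def sum_array_alt (arr : Option (List Int)) : Int :=
  match arr with
  | none => 0
  | some l =>
    (PySem.List.slice (PySem.List.sorted l (fun x => x) false) (some 1) (some (-1))).foldl (· + ·) 0

-- ===== PRECONDITION & SPEC =====
def Spec_sum_array (arr : Option (List Int)) (out : Int) : Prop := out = sum_array_alt arr
instance (arr : Option (List Int)) (out : Int) : Decidable (Spec_sum_array arr out) := by unfold Spec_sum_array; infer_instance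

-- ===== CLAIM (what is proved, stated in full; the proofs are below) =====
def Claim_equal_sum_array : Prop := ∀ (arr : Option (List Int)), Dom_sum_array arr → Spec_sum_array arr (sum_array arr)

-- ===== LEMMAS AND PROOFS =====

theorem slice_one_neg_one (xs : List Int) :
    PySem.List.slice xs (some 1) (some (-1)) = xs.tail.dropLast := by
  simp [PySem.List.slice]
  cases xs with
  | nil => simp
  | cons x t => simp [List.dropLast_eq_take]

theorem le_getLast_of_pairwise (s : List Int) (h : s ≠ []) (hp : s.Pairwise (· ≤ ·))
    (y : Int) (hy : y ∈ s) : y ≤ s.getLast h := by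
  obtain ⟨i, hi, rfl⟩ := List.mem_iff_getElem.mp hy
  rw [List.getLast_eq_getElem]
  rcases Nat.lt_or_ge i (s.length - 1) with hlt | hge
  · exact List.pairwise_iff_getElem.mp hp i (s.length - 1) hi (by omega) hlt
  · have : i = s.length - 1 := by omega
    subst this; exact le_refl _

theorem sum_dropLast (s : List Int) (h : s ≠ []) :
    s.dropLast.sum = s.sum - s.getLast h := by
  have h2 : s.sum = s.dropLast.sum + s.getLast h := by
    conv_lhs => rw [← List.dropLast_append_getLast h]
    simp
  omega

-- ===== VERDICT (by name: the statement is the Claim_ definition above) =====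
theorem sum_array_spec : Claim_equal_sum_array := by
  intro arr _
  unfold Spec_sum_array
  cases arr with
  | none => rfl
  | some l =>
    simp only [sum_array, sum_array_alt, slice_one_neg_one]
    have hslen : (PySem.List.sorted l (fun x => x) false).length = l.length :=
      PySem.List.length_sorted l _ false
    by_cases hlen : l.length ≤ 2
    · rw [if_pos hlen]
      have : (PySem.List.sorted l (fun x => x) false).tail.dropLast = [] := by
        apply List.eq_nil_of_length_eq_zero
        simp [hslen]; omega
      rw [this]; rfl
    · rw [if_neg hlen]
      obtain ⟨x, t, hs⟩ : ∃ x t, PySem.List.sorted l (fun x => x) false = x :: t :=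
        List.exists_cons_of_ne_nil (by
          intro h0; rw [h0] at hslen; simp at hslen; omega)
      have hperm : (PySem.List.sorted l (fun x => x) false).Perm l :=
        PySem.List.sorted_perm l _ false
      have hsum_s : x + t.sum = l.sum := by
        have := hperm.sum_eq; rw [hs] at this; simpa using this
      have ht : t ≠ [] := by
        intro h0; rw [hs, h0] at hslen; simp at hslen; omega
      -- min? and max? are some, since l ≠ []
      obtain ⟨m, hm⟩ : ∃ m, PySem.List.min? l (fun x => x) = some m := by
        cases hmin : PySem.List.min? l (fun x => x) with
        | none =>
          rw [PySem.List.min?_eq_none_iff] at hmin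
          rw [hmin] at hlen; simp at hlen
        | some m => exact ⟨m, rfl⟩
      obtain ⟨b, hb⟩ : ∃ b, PySem.List.max? l (fun x => x) = some b := by
        cases hmax : PySem.List.max? l (fun x => x) with
        | none =>
          rw [PySem.List.max?_eq_none_iff] at hmax
          rw [hmax] at hlen; simp at hlen
        | some b => exact ⟨b, rfl⟩
      rw [hm, hb, hs]
      simp only [Option.getD_some, List.tail_cons]
      -- the index loop of A sums l
      rw [PySem.List.foldl_pyRange_zero_pyGetD' l 0 (fun acc x => acc + x) 0,
          ← List.sum_eq_foldl, ← List.sum_eq_foldl]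
      -- the head of the sorted list is min(l)
      have hmx : m = x := by
        have h1 : m ≤ x := PySem.List.min?_isMin hm x (by
          rw [← PySem.List.mem_sorted l (fun x => x) false, hs]; simp)
        have h2 : x ≤ m :=
          PySem.List.key_head_sorted_le l (fun x => x) hs m (PySem.List.min?_mem hm)
        omega
      -- the last of the sorted list is max(l)
      have hbl : b = t.getLast ht := by
        have hlast_mem : t.getLast ht ∈ l := by
          rw [← PySem.List.mem_sorted l (fun x => x) false, hs]
          exact List.mem_cons_of_mem x (List.getLast_mem ht)
        have h1 : t.getLast ht ≤ b := PySem.List.max?_isMax hb _ hlast_mem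
        have h2 : b ≤ t.getLast ht := by
          have hbs : b ∈ x :: t := by
            rw [← hs, PySem.List.mem_sorted l (fun x => x) false]
            exact PySem.List.max?_mem hb
          have hpw : (x :: t).Pairwise (· ≤ ·) := by
            have := PySem.List.sorted_pairwise l (fun x => x)
            rw [hs] at this; exact this
          have := le_getLast_of_pairwise (x :: t) (by simp) hpw b hbs
          rwa [List.getLast_cons ht] at this
        omega
      rw [sum_dropLast t ht, hmx, ← hbl]
      omega
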